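-- pv_equiv track=rewrite | github.com/egementunca/sat_revsynth | scripts/visualize_circuits.py | draw_eca57_circuit
-- ===== SOURCE A (Python) =====
-- def draw_eca57_circuit(width, gates):
--     """Draw ASCII for ECA57 circuit: target ^= (c1 OR !c2)."""
--     grid = [['-' for _ in range(len(gates) * 2 + 1)] for _ in range(width)]
--     for i, (target, c1, c2) in enumerate(gates):
--         col = i * 2 + 1
--         # Draw vertical backbone
--         min_wire = min(target, c1, c2)
--         max_wire = max(target, c1, c2)
--         for w in range(min_wire, max_wire + 1):
--             grid[w][col] = '|'
--
--         # Draw connections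
--         grid[target][col] = '⊕'
--         grid[c1][col] = '●' # Active High
--         grid[c2][col] = '○' # Active Low
--
--     return "\n".join([f"q{i}: " + "".join(grid[i]) for i in range(width)])
-- ===== SOURCE B (Python) =====
-- def draw_eca57_circuit(width, gates):
--     """Draw ASCII for ECA57 circuit: target ^= (c1 OR !c2)."""
--     info = [(t, c1, c2, min(t, c1, c2), max(t, c1, c2)) for (t, c1, c2) in gates]
--     rows = []
--     for w in range(width):
--         cells = []
--         for (target, c1, c2, lo, hi) in info:
--             if w == c2:
--                 ch = '○'
--             elif w == c1:
--                 ch = '●'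
--             elif w == target:
--                 ch = '⊕'
--             elif lo <= w <= hi:
--                 ch = '|'
--             else:
--                 ch = '-'
--             cells.append('-')
--             cells.append(ch)
--         cells.append('-')
--         rows.append(f"q{w}: " + "".join(cells))
--     return "\n".join(rows)
-- ===== Notes on version B (the rewrite author's own statement) =====
-- stated objective: simpler
-- what changed: Instead of allocating a width x (2*len(gates)+1) grid and mutating cells gate-by-gate (backbone then three overwrites), B emits the diagram one wire-row at a time, computing each gate's column character directly by a precedence test (c2, then c1, then target, then backbone), keeping no intermediate grid.
-- outside the precondition, e.g. on draw_eca57_circuit(2, [(0, -1, 0)]): A returns 'q0: -○-\nq1: -●-', B returns 'q0: -○-\nq1: ---'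
import Mathlib
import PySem

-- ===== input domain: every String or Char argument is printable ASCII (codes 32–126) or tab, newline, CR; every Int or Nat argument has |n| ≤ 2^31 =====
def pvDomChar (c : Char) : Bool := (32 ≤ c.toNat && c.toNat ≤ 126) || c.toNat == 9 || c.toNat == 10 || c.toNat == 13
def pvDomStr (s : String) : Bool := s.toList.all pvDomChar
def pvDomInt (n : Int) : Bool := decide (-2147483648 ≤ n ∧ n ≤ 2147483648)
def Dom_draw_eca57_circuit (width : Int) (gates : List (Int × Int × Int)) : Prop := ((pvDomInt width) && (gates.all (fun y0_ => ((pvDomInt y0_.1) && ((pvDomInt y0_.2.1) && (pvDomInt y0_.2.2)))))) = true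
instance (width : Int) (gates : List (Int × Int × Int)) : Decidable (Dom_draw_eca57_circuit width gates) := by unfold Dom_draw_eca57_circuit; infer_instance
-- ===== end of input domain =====

-- B renders the diagram one wire-row at a time, choosing each gate's column character by a
-- precedence test, instead of A's mutable 2D grid written gate-by-gate; objective: simpler.

-- ===== PORT A =====
-- grid[w][col] = v  (Python item assignment on the inner then the outer list; exact for in-range
-- indices, which Pre_ guarantees — out of range Python raises IndexError)
def pvSet2 (g : List (List Char)) (w col : Int) (v : Char) : List (List Char) :=
  PySem.List.pySetD g w (PySem.List.pySetD (PySem.List.pyGetD g w []) col v)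

-- body of A's 'for i, (target, c1, c2) in enumerate(gates)' loop
def pvStepA (g : List (List Char)) (p : Int × Int × Int × Int) : List (List Char) :=
  let i := p.1
  let target := p.2.1
  let c1 := p.2.2.1
  let c2 := p.2.2.2
  let col := i * 2 + 1
  let mn := min target (min c1 c2)
  let mx := max target (max c1 c2)
  let g := (PySem.List.pyRange mn (mx + 1) 1).foldl (fun g w => pvSet2 g w col '|') g
  let g := pvSet2 g target col '⊕'
  let g := pvSet2 g c1 col '●'
  pvSet2 g c2 col '○'

def pvGridA (width : Int) (gates : List (Int × Int × Int)) : List (List Char) :=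
  (PySem.List.enumerate gates 0).foldl pvStepA
    ((PySem.List.pyRange 0 width 1).map (fun _ => List.replicate (gates.length * 2 + 1) '-'))

def draw_eca57_circuit (width : Int) (gates : List (Int × Int × Int)) : String :=
  PySem.Str.join "\n" ((PySem.List.pyRange 0 width 1).map (fun i =>
    "q" ++ PySem.Int.toStr i ++ ": " ++ String.ofList (PySem.List.pyGetD (pvGridA width gates) i [])))

-- ===== PORT B =====
-- one entry of B's precomputed 'info' list: (target, c1, c2, min, max) for a gate
def pvInfoOf (g : Int × Int × Int) : Int × Int × Int × Int × Int :=
  (g.1, g.2.1, g.2.2, min g.1 (min g.2.1 g.2.2), max g.1 (max g.2.1 g.2.2))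

-- the character row w shows in this gate's column (precedence: c2, c1, target, backbone)
def pvInfoChar (w : Int) (q : Int × Int × Int × Int × Int) : Char :=
  if w = q.2.2.1 then '○'
  else if w = q.2.1 then '●'
  else if w = q.1 then '⊕'
  else if q.2.2.2.1 ≤ w ∧ w ≤ q.2.2.2.2 then '|'
  else '-'

def draw_eca57_circuit_alt (width : Int) (gates : List (Int × Int × Int)) : String :=
  let info := gates.map pvInfoOf
  PySem.Str.join "\n" ((PySem.List.pyRange 0 width 1).map (fun w =>
    "q" ++ PySem.Int.toStr w ++ ": " ++ String.ofList
      (info.foldl (fun cells q => cells ++ ['-', pvInfoChar w q]) [] ++ ['-'])))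

-- ===== PRECONDITION & SPEC =====
-- Pre_ restricts to the natural domain: every gate wire in [0, width). Outside it A either raises
-- IndexError (a wire < -width or ≥ width) or, for a wire in [-width, 0), silently draws the gate
-- on wire width+w via Python's negative-index wraparound — inputs outside the natural domain.
def Pre_draw_eca57_circuit (width : Int) (gates : List (Int × Int × Int)) : Prop :=
  ∀ g ∈ gates, (0 ≤ g.1 ∧ g.1 < width) ∧ (0 ≤ g.2.1 ∧ g.2.1 < width) ∧ (0 ≤ g.2.2 ∧ g.2.2 < width)
instance (width : Int) (gates : List (Int × Int × Int)) : Decidable (Pre_draw_eca57_circuit width gates) := by unfold Pre_draw_eca57_circuit; infer_instance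

def pvWitness_draw_eca57_circuit : Int × (List (Int × Int × Int)) := (2, [(1, 0, 0)])

def Spec_draw_eca57_circuit (width : Int) (gates : List (Int × Int × Int)) (out : String) : Prop := out = draw_eca57_circuit_alt width gates
instance (width : Int) (gates : List (Int × Int × Int)) (out : String) : Decidable (Spec_draw_eca57_circuit width gates out) := by unfold Spec_draw_eca57_circuit; infer_instance

-- ===== CLAIM (what is proved, stated in full; the proofs are below) =====
def Claim_equal_draw_eca57_circuit : Prop := ∀ (width : Int) (gates : List (Int × Int × Int)), Dom_draw_eca57_circuit width gates → Pre_draw_eca57_circuit width gates → Spec_draw_eca57_circuit width gates (draw_eca57_circuit width gates)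

-- ===== LEMMAS AND PROOFS =====

-- B's per-gate column character, phrased directly on the gate (= pvInfoChar after pvInfoOf)
def pvGateChar (w : Int) (g : Int × Int × Int) : Char :=
  if w = g.2.2 then '○'
  else if w = g.2.1 then '●'
  else if w = g.1 then '⊕'
  else if min g.1 (min g.2.1 g.2.2) ≤ w ∧ w ≤ max g.1 (max g.2.1 g.2.2) then '|'
  else '-'

theorem pvInfoChar_eq (w : Int) (g : Int × Int × Int) :
    pvInfoChar w (pvInfoOf g) = pvGateChar w g := rfl

-- row w of the model grid: the first 'done' gates drawn, 'rest' gate columns still blank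
def pvRow (w : Int) (done : List (Int × Int × Int)) (rest : Nat) : List Char :=
  done.flatMap (fun g => ['-', pvGateChar w g]) ++ List.replicate (2 * rest + 1) '-'

-- the pointwise effect of drawing one gate on row w
def pvApply (t c1 c2 col w : Int) (row : List Char) : List Char :=
  if w = c2 ∨ w = c1 ∨ w = t ∨ (min t (min c1 c2) ≤ w ∧ w ≤ max t (max c1 c2)) then
    PySem.List.pySetD row col (pvGateChar w (t, c1, c2))
  else row

theorem pvLenFlat (w : Int) (gs : List (Int × Int × Int)) :
    (gs.flatMap (fun g => ['-', pvGateChar w g])).length = 2 * gs.length := by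
  induction gs with
  | nil => simp
  | cons g gs ih => simp [ih]; omega

theorem pvFoldAppend (w : Int) (gs : List (Int × Int × Int)) (acc : List Char) :
    gs.foldl (fun cells g => cells ++ ['-', pvGateChar w g]) acc
      = acc ++ gs.flatMap (fun g => ['-', pvGateChar w g]) := by
  induction gs generalizing acc with
  | nil => simp
  | cons g gs ih => simp [ih]

theorem pvSet2_map (n r col : Int) (v : Char) (f : Int → List Char)
    (h0 : 0 ≤ r) (hn : r < n) :
    pvSet2 ((PySem.List.pyRange 0 n 1).map f) r col v
      = (PySem.List.pyRange 0 n 1).map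
          (fun w => if w = r then PySem.List.pySetD (f w) col v else f w) := by
  unfold pvSet2
  rw [PySem.List.pyGetD_map_pyRange_of_nonneg f n r [] h0 hn]
  rw [PySem.List.pySetD_of_nonneg _ _ h0]
  apply List.ext_getElem
  · simp
  · intro k h1 h2
    simp only [List.getElem_set, List.getElem_map, PySem.List.getElem_pyRange_one]
    split_ifs with h h' h'
    · rw [show (0 + (k:Int)) = r by omega]
    · omega
    · omega
    · rfl

theorem pvBackbone (n col : Int) : ∀ (k : Nat) (a b : Int) (f : Int → List Char),
    (b - a).toNat = k → 0 ≤ a → b ≤ n →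
    (PySem.List.pyRange a b 1).foldl (fun g w => pvSet2 g w col '|')
        ((PySem.List.pyRange 0 n 1).map f)
      = (PySem.List.pyRange 0 n 1).map
          (fun w => if a ≤ w ∧ w < b then PySem.List.pySetD (f w) col '|' else f w) := by
  intro k
  induction k with
  | zero =>
    intro a b f hk ha hb
    rw [PySem.List.pyRange_one_eq_nil (by omega : b ≤ a)]
    simp only [List.foldl_nil]
    refine List.map_congr_left (fun w hw => ?_)
    rw [PySem.List.mem_pyRange_one] at hw
    rw [if_neg (by omega)]
  | succ k ih =>
    intro a b f hk ha hb
    rw [PySem.List.pyRange_one_cons (by omega : a < b)]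
    simp only [List.foldl_cons]
    rw [pvSet2_map n a col '|' f ha (by omega)]
    rw [ih (a + 1) b _ (by omega) (by omega) hb]
    refine List.map_congr_left (fun w hw => ?_)
    rw [PySem.List.mem_pyRange_one] at hw
    by_cases hwa : w = a
    · subst hwa
      rw [if_neg (by omega), if_pos rfl, if_pos (by omega)]
    · rw [if_neg hwa]
      by_cases hc : a + 1 ≤ w ∧ w < b
      · rw [if_pos hc, if_pos (by omega)]
      · rw [if_neg hc, if_neg (by omega)]

theorem pvPointwise (t c1 c2 col w : Int) (hcol : 0 ≤ col) (row : List Char) :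
    (let r0 := if min t (min c1 c2) ≤ w ∧ w < max t (max c1 c2) + 1 then PySem.List.pySetD row col '|' else row
     let r1 := if w = t then PySem.List.pySetD r0 col '⊕' else r0
     let r2 := if w = c1 then PySem.List.pySetD r1 col '●' else r1
     if w = c2 then PySem.List.pySetD r2 col '○' else r2)
    = pvApply t c1 c2 col w row := by
  simp only [pvApply, pvGateChar]
  split_ifs <;>
    first
      | rfl
      | omega
      | simp only [PySem.List.pySetD_of_nonneg _ _ hcol, List.set_set]

theorem pvStepA_map (n i t c1 c2 : Int) (f : Int → List Char) (hi : 0 ≤ i)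
    (ht : 0 ≤ t ∧ t < n) (hc1 : 0 ≤ c1 ∧ c1 < n) (hc2 : 0 ≤ c2 ∧ c2 < n) :
    pvStepA ((PySem.List.pyRange 0 n 1).map f) (i, t, c1, c2)
      = (PySem.List.pyRange 0 n 1).map
          (fun w => pvApply t c1 c2 (i * 2 + 1) w (f w)) := by
  unfold pvStepA
  simp only
  rw [pvBackbone n (i * 2 + 1) (max t (max c1 c2) + 1 - min t (min c1 c2)).toNat
        (min t (min c1 c2)) (max t (max c1 c2) + 1) f rfl (by omega) (by omega)]
  rw [pvSet2_map n t (i * 2 + 1) '⊕' _ ht.1 ht.2]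
  rw [pvSet2_map n c1 (i * 2 + 1) '●' _ hc1.1 hc1.2]
  rw [pvSet2_map n c2 (i * 2 + 1) '○' _ hc2.1 hc2.2]
  refine List.map_congr_left (fun w hw => ?_)
  have h := pvPointwise t c1 c2 (i * 2 + 1) w (by omega) (f w)
  simp only at h
  rw [← h]

theorem pvSetAppend (P R : List Char) (c x y : Char) :
    (P ++ x :: y :: R).set (P.length + 1) c = P ++ x :: c :: R := by
  induction P with
  | nil => simp
  | cons p P ih => simp [ih]

theorem pvRepSplit (rest : Nat) :
    List.replicate (2 * (rest + 1) + 1) '-' = '-' :: '-' :: List.replicate (2 * rest + 1) '-' := by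
  rw [show 2 * (rest + 1) + 1 = (2 * rest + 1) + 1 + 1 by ring]
  simp [List.replicate_succ]

theorem pvRowUpdate (w : Int) (done : List (Int × Int × Int)) (g : Int × Int × Int) (rest : Nat) :
    pvApply g.1 g.2.1 g.2.2 ((done.length : Int) * 2 + 1) w (pvRow w done (rest + 1))
      = pvRow w (done ++ [g]) rest := by
  obtain ⟨t, c1, c2⟩ := g
  simp only [pvApply, pvRow, pvRepSplit]
  split_ifs with h
  · rw [PySem.List.pySetD_of_nonneg _ _ (by omega)]
    rw [show ((done.length : Int) * 2 + 1).toNat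
          = (done.flatMap (fun g => ['-', pvGateChar w g])).length + 1 by
        rw [pvLenFlat]; omega]
    rw [pvSetAppend]
    simp [List.flatMap_append]
  · have hg : pvGateChar w (t, c1, c2) = '-' := by
      simp only [pvGateChar]
      split_ifs with h1 h2 h3 h4
      · exact absurd (Or.inl h1) h
      · exact absurd (Or.inr (Or.inl h2)) h
      · exact absurd (Or.inr (Or.inr (Or.inl h3))) h
      · exact absurd (Or.inr (Or.inr (Or.inr h4))) h
      · rfl
    simp [List.flatMap_append, hg]

theorem pvFoldInv (n : Int) : ∀ (gs done : List (Int × Int × Int)),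
    (∀ g ∈ gs, (0 ≤ g.1 ∧ g.1 < n) ∧ (0 ≤ g.2.1 ∧ g.2.1 < n) ∧ (0 ≤ g.2.2 ∧ g.2.2 < n)) →
    (PySem.List.enumerate gs (done.length : Int)).foldl pvStepA
        ((PySem.List.pyRange 0 n 1).map (fun w => pvRow w done gs.length))
      = (PySem.List.pyRange 0 n 1).map (fun w => pvRow w (done ++ gs) 0) := by
  intro gs
  induction gs with
  | nil => intro done h; simp [PySem.List.enumerate_nil]
  | cons g gs ih =>
    intro done h
    obtain ⟨t, c1, c2⟩ := g
    have hb := h (t, c1, c2) (List.mem_cons_self)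
    rw [PySem.List.enumerate_cons]
    simp only [List.foldl_cons, List.length_cons]
    rw [pvStepA_map n (done.length : Int) t c1 c2 _ (by omega) hb.1 hb.2.1 hb.2.2]
    rw [funext (fun w => pvRowUpdate w done (t, c1, c2) gs.length)]
    rw [show ((done.length : Int) + 1) = (((done ++ [(t, c1, c2)]).length : Nat) : Int) by
      simp]
    rw [ih (done ++ [(t, c1, c2)]) (fun g hg => h g (List.mem_cons_of_mem _ hg))]
    simp

theorem pvGridA_eq (width : Int) (gates : List (Int × Int × Int))
    (h : Pre_draw_eca57_circuit width gates) :
    pvGridA width gates = (PySem.List.pyRange 0 width 1).map (fun w => pvRow w gates 0) := by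
  unfold pvGridA
  rw [show (fun (_ : Int) => List.replicate (gates.length * 2 + 1) '-')
        = (fun w => pvRow w ([] : List (Int × Int × Int)) gates.length) by
    funext w; simp [pvRow, Nat.mul_comm]]
  have hf := pvFoldInv width gates [] h
  simp only [List.length_nil, Nat.cast_zero, List.nil_append] at hf
  exact hf

-- ===== VERDICT (by name: the statement is the Claim_ definition above) =====
theorem draw_eca57_circuit_spec : Claim_equal_draw_eca57_circuit := by
  intro width gates _ hpre
  unfold Spec_draw_eca57_circuit draw_eca57_circuit draw_eca57_circuit_alt
  rw [pvGridA_eq width gates hpre]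
  congr 1
  refine List.map_congr_left (fun i hi => ?_)
  rw [PySem.List.mem_pyRange_one] at hi
  rw [PySem.List.pyGetD_map_pyRange_of_nonneg _ _ _ _ hi.1 hi.2]
  rw [List.foldl_map]
  rw [show (fun (cells : List Char) (g : Int × Int × Int) => cells ++ ['-', pvInfoChar i (pvInfoOf g)])
        = (fun cells g => cells ++ ['-', pvGateChar i g]) by
    funext cells g; rw [pvInfoChar_eq]]
  rw [pvFoldAppend]
  simp [pvRow]
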